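-- pv_equiv track=rewrite | github.com/Jayce-Ping/Rubiks-Cube | python/permutation.py | _cycles_disjointQ
-- ===== SOURCE A (Python) =====
-- def _cycles_disjointQ(cycles):
--     """
--         Check if all cycles are disjoint.
--     """
--     seen = set()
--     for cycle in cycles:
--         for element in cycle:
--             if element in seen:
--                 return False
--             seen.add(element)
--
--     return True
-- ===== SOURCE B (Python) =====
-- def _cycles_disjointQ(cycles):
--     """
--         Check if all cycles are disjoint.
--     """
--     total = sum(len(c) for c in cycles)
--     union = {e for c in cycles for e in c}
--     return len(union) == total
-- ===== Notes on version B (the rewrite author's own statement) =====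
-- stated objective: simpler
-- what changed: Replaced A's incremental check-then-add loop with early return by two aggregate computations: total element count vs cardinality of the flattened set, compared once at the end.
import Mathlib
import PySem

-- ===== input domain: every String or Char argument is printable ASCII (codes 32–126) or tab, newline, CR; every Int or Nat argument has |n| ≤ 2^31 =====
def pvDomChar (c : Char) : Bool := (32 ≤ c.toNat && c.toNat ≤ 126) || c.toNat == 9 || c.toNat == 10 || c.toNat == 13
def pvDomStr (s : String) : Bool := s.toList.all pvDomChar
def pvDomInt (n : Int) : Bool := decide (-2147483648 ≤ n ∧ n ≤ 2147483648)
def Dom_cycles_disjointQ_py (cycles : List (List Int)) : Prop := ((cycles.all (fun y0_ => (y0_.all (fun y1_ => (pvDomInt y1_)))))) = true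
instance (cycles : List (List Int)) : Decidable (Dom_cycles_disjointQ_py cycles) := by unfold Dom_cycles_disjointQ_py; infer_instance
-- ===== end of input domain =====

-- B replaces A's incremental membership-check loop (with early return) by two aggregate
-- computations compared once: total element count vs cardinality of the flattened set (objective: simpler).

-- ===== PORT A =====
-- inner 'for element in cycle' loop: none = early 'return False', some = updated seen
def pvInnerA (seen : PySem.Set Int) : List Int → Option (PySem.Set Int)
  | [] => some seen
  | e :: rest =>
    if PySem.Set.contains seen e then none
    else pvInnerA (PySem.Set.add seen e) rest

-- outer 'for cycle in cycles' loop
def pvOuterA (seen : PySem.Set Int) : List (List Int) → Bool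
  | [] => true
  | c :: cs =>
    match pvInnerA seen c with
    | none => false
    | some s => pvOuterA s cs

def cycles_disjointQ_py (cycles : List (List Int)) : Bool :=
  pvOuterA PySem.Set.empty cycles

-- ===== PORT B =====
def cycles_disjointQ_py_alt (cycles : List (List Int)) : Bool :=
  let total : Int := (cycles.map (fun c => (c.length : Int))).sum
  let union : PySem.Set Int := PySem.Set.ofList (cycles.flatMap (fun c => c))
  decide (PySem.Set.len union = total)

-- ===== PRECONDITION & SPEC =====
def Spec_cycles_disjointQ_py (cycles : List (List Int)) (out : Bool) : Prop := out = cycles_disjointQ_py_alt cycles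
instance (cycles : List (List Int)) (out : Bool) : Decidable (Spec_cycles_disjointQ_py cycles out) := by unfold Spec_cycles_disjointQ_py; infer_instance

-- ===== CLAIM (what is proved, stated in full; the proofs are below) =====
def Claim_equal_cycles_disjointQ_py : Prop := ∀ (cycles : List (List Int)), Dom_cycles_disjointQ_py cycles → Spec_cycles_disjointQ_py cycles (cycles_disjointQ_py cycles)

-- ===== LEMMAS AND PROOFS =====

-- set(xs) keeps first occurrences in order, so it is a sublist of xs
theorem pv_ofList_sublist (xs : List Int) : (PySem.Set.ofList xs).Sublist xs := by
  induction xs using List.reverseRecOn with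
  | nil => simp [PySem.Set.ofList, PySem.Set.empty]
  | append_singleton ys y ih =>
    rw [PySem.Set.ofList_append_singleton, PySem.Set.add_eq_ite]
    split
    · exact ih.trans (List.sublist_append_left ys [y])
    · exact ih.append (List.Sublist.refl [y])

theorem pv_len_ofList_eq_iff (xs : List Int) :
    (PySem.Set.ofList xs).length = xs.length ↔ xs.Nodup := by
  constructor
  · intro h
    have := (pv_ofList_sublist xs).eq_of_length h
    rw [← this]; exact PySem.Set.nodup_ofList xs
  · intro h
    exact congrArg List.length (PySem.Set.ofList_eq_self_of_nodup xs h)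

theorem pv_innerA_eq (c : List Int) : ∀ (seen : PySem.Set Int), seen.Nodup →
    pvInnerA seen c = if (seen ++ c).Nodup then some (seen ++ c) else none := by
  induction c with
  | nil => intro seen h; simp [pvInnerA, h]
  | cons e rest ih =>
    intro seen h
    by_cases hm : e ∈ seen
    · have : ¬ (seen ++ e :: rest).Nodup := by
        intro hn
        exact (List.disjoint_of_nodup_append hn) hm (by simp)
      simp [pvInnerA, hm, this]
    · have hadd : PySem.Set.add seen e = seen ++ [e] := PySem.Set.add_of_not_mem hm
      have hnd : (seen ++ [e]).Nodup := by
        simp [List.nodup_append, h]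
        exact fun a ha he => hm (he ▸ ha)
      have := ih (seen ++ [e]) hnd
      simp only [pvInnerA, PySem.Set.contains_iff]
      rw [if_neg (by simpa using hm), hadd, this, List.append_assoc, List.singleton_append]

theorem pv_outerA_eq (cycles : List (List Int)) : ∀ (seen : PySem.Set Int), seen.Nodup →
    pvOuterA seen cycles = decide ((seen ++ cycles.flatten).Nodup) := by
  induction cycles with
  | nil => intro seen h; simp [pvOuterA, h]
  | cons c cs ih =>
    intro seen h
    rw [pvOuterA, pv_innerA_eq c seen h]
    by_cases hn : (seen ++ c).Nodup
    · rw [if_pos hn]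
      show pvOuterA (seen ++ c) cs = _
      rw [ih (seen ++ c) hn]
      simp [List.append_assoc]
    · rw [if_neg hn]
      have hsub : (seen ++ c).Sublist (seen ++ (c :: cs).flatten) := by
        simp only [List.flatten_cons, ← List.append_assoc]
        exact List.sublist_append_left _ _
      have hbig : ¬ ((seen ++ (c :: cs).flatten).Nodup) :=
        fun hb => hn (List.Nodup.sublist hsub hb)
      simp only [List.flatten_cons] at hbig
      simp [hbig]

theorem pv_sum_lengths (cycles : List (List Int)) :
    (cycles.map (fun c => (c.length : Int))).sum = ((cycles.flatten.length : Int)) := by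
  induction cycles with
  | nil => simp
  | cons c cs ih => simp [ih]

-- ===== VERDICT (by name: the statement is the Claim_ definition above) =====
theorem cycles_disjointQ_py_spec : Claim_equal_cycles_disjointQ_py := by
  unfold Claim_equal_cycles_disjointQ_py
  intro cycles _
  have hA : cycles_disjointQ_py cycles = decide (cycles.flatten.Nodup) := by
    unfold cycles_disjointQ_py
    rw [pv_outerA_eq cycles PySem.Set.empty (by simp [PySem.Set.empty])]
    simp [PySem.Set.empty]
  have hflat : cycles.flatMap (fun c => c) = cycles.flatten := by simp
  have hB : cycles_disjointQ_py_alt cycles = decide (cycles.flatten.Nodup) := by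
    unfold cycles_disjointQ_py_alt
    simp only [PySem.Set.len, hflat, pv_sum_lengths]
    rw [decide_eq_decide, Nat.cast_inj]
    exact pv_len_ofList_eq_iff _
  unfold Spec_cycles_disjointQ_py
  rw [hA, hB]
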